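-- pv_equiv track=rewrite | github.com/manggong/Algorithm | Programmers/joystick.py | solution
-- ===== SOURCE A (Python) =====
-- def solution(name):
--
--     terms = [min(ord(i) - ord('A'), ord('Z') - ord(i) + 1) for i in name]
--     idx = 0
--     answer = 0
--
--     while True:
--         answer += terms[idx]
--         terms[idx] = 0
--         if sum(terms) == 0:
--             return answer
--
--         left, right = 1, 1
--         while terms[idx - left] == 0:
--             left += 1
--         while terms[idx - right] == 0:
--             right += 1
--
--         answer += left if left < right else right
--         idx -= left if left < right else right
-- ===== SOURCE B (Python) =====
-- def solution(name):
--     terms = [min(ord(c) - ord('A'), ord('Z') - ord(c) + 1) for c in name]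
--     n = len(terms)
--     s = 0
--     p = n
--     for i in range(1, n):
--         if s == 0 and terms[i] != 0:
--             p = i
--         s += terms[i]
--     if s == 0:
--         p = n
--     return sum(terms) + (n - p)
-- ===== Notes on version B (the rewrite author's own statement) =====
-- stated objective: faster
-- what changed: Replaces the mutating cursor simulation (repeated sum() over the list and a linear scan per visited letter) by one left-to-right pass that tracks the running prefix sum to find the stop position, then returns total cost + n - stop in closed form.
import Mathlib
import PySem

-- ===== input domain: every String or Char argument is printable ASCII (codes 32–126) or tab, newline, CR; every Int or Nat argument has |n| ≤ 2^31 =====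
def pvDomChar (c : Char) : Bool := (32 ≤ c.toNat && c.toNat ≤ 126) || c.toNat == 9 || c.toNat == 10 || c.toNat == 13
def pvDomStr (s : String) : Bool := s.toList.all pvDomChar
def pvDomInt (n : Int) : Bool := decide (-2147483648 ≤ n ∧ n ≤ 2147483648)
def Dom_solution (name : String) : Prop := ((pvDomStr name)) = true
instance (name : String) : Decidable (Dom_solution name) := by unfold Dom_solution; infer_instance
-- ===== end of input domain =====

-- B replaces A's quadratic cursor simulation by a single left-to-right pass that finds the
-- stop position from running prefix sums and returns a closed form; A = B on every nonempty name.

-- per-letter vertical cost min(ord(i) - ord('A'), ord('Z') - ord(i) + 1), shared by both ports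
def pvCost (c : Char) : Int := min ((c.toNat : Int) - 65) (91 - (c.toNat : Int))

-- ===== PORT A =====
-- the inner "while terms[idx - left] == 0: left += 1" loop, fueled; the fuel always suffices on the
-- inputs A returns on, and 'none' is Python's IndexError (unreachable for a nonempty name)
def pvScan (terms : List Int) (idx : Int) (left : Int) (fuel : Nat) : Int :=
  match fuel with
  | 0 => left
  | f + 1 =>
    match PySem.List.pyGet? terms (idx - left) with
    | none => left
    | some v => if v = 0 then pvScan terms idx (left + 1) f else left

-- the "while True" loop of A over the mutable state (terms, idx, answer), fueled
def pvLoopA (fuel : Nat) (terms : List Int) (idx answer : Int) : Int :=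
  match fuel with
  | 0 => answer
  | f + 1 =>
    match PySem.List.pyGet? terms idx with
    | none => answer  -- IndexError: reached only on the empty name, excluded by Pre_solution
    | some t =>
      let answer := answer + t
      let terms := PySem.List.pySetD terms idx 0
      if terms.sum = 0 then answer
      else
        let left := pvScan terms idx 1 terms.length
        let right := pvScan terms idx 1 terms.length
        let step := if left < right then left else right
        pvLoopA f terms (idx - step) (answer + step)

def solution (name : String) : Int :=
  let terms := name.toList.map pvCost
  pvLoopA (terms.length + 1) terms 0 0

-- ===== PORT B =====
-- "for i in range(1, n): if s == 0 and terms[i] != 0: p = i; s += terms[i]" over the tail,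
-- carrying (index i, running sum s, current candidate p)
def pvFold : List Int → Int → Int → Int → Int × Int
  | [], _, s, p => (s, p)
  | t :: ts, i, s, p => pvFold ts (i + 1) (s + t) (if s = 0 ∧ t ≠ 0 then i else p)

def solution_alt (name : String) : Int :=
  let terms := name.toList.map pvCost
  let n : Int := terms.length
  let r := pvFold (terms.drop 1) 1 0 n
  let p := if r.1 = 0 then n else r.2
  terms.sum + (n - p)

-- ===== PRECONDITION & SPEC =====
-- Pre_ excludes only the empty name, on which A raises IndexError (terms[0] of an empty list).
def Pre_solution (name : String) : Prop := name.toList ≠ []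
instance (name : String) : Decidable (Pre_solution name) := by unfold Pre_solution; infer_instance
def pvWitness_solution : String := "JAZ"

def Spec_solution (name : String) (out : Int) : Prop := out = solution_alt name
instance (name : String) (out : Int) : Decidable (Spec_solution name out) := by unfold Spec_solution; infer_instance

-- ===== CLAIM (what is proved, stated in full; the proofs are below) =====
def Claim_equal_solution : Prop := ∀ (name : String), Dom_solution name → Pre_solution name → Spec_solution name (solution name)

-- ===== LEMMAS AND PROOFS =====
-- proof-side helpers
def pvShape (l : List Int) (a : Nat) : List Int := 0 :: (l.take a ++ List.replicate (l.length - a) 0)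

def pvHigh : List Int → Option Nat
  | [] => none
  | t :: ts =>
    match pvHigh ts with
    | some k => some (k + 1)
    | none => if t ≠ 0 then some 0 else none

-- q is the greatest "stop checkpoint" at or below j: a position with nonzero cost whose
-- strict prefix of tail costs sums to zero
def pvGC (l : List Int) (j q : Nat) : Prop :=
  q ≤ j ∧ (l.take q).sum = 0 ∧ l.getD q 0 ≠ 0 ∧
    ∀ k, k ≤ j → (l.take k).sum = 0 → l.getD k 0 ≠ 0 → k ≤ q

theorem pvSetD_neg (xs : List Int) (k : Nat) (v : Int) (h1 : 0 < k) (h2 : k ≤ xs.length) :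
    PySem.List.pySetD xs (-(k:Int)) v = xs.set (xs.length - k) v := by
  simp only [PySem.List.pySetD, PySem.List.pySet?, PySem.List.pyIdx?]
  rw [if_neg (by omega), if_pos (by omega : -(xs.length:Int) ≤ -(k:Int))]
  simp only [Option.map_some, Option.getD_some]
  congr 1
  omega

theorem length_pvShape (l : List Int) (a : Nat) (ha : a ≤ l.length) :
    (pvShape l a).length = l.length + 1 := by
  simp [pvShape]; omega

theorem pvShape_get? (l : List Int) (a p : Nat) (hp : 1 ≤ p) (hpa : p ≤ a) (ha : a ≤ l.length) :
    (pvShape l a)[p]? = some (l.getD (p-1) 0) := by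
  obtain ⟨q, rfl⟩ : ∃ q, p = q + 1 := ⟨p - 1, by omega⟩
  simp only [pvShape, List.getElem?_cons_succ]
  rw [List.getElem?_append_left (by simp; omega)]
  rw [List.getElem?_take_of_lt (by omega)]
  rw [List.getElem?_eq_getElem (by omega)]
  simp only [Nat.add_sub_cancel]
  rw [List.getD_eq_getElem?_getD, List.getElem?_eq_getElem (by omega : q < l.length)]
  rfl

theorem sum_pvShape (l : List Int) (a : Nat) : (pvShape l a).sum = (l.take a).sum := by
  simp [pvShape]

theorem set_pvShape (l : List Int) (a : Nat) (h : a < l.length) :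
    (pvShape l (a+1)).set (a+1) 0 = pvShape l a := by
  have ht : l.take (a+1) = l.take a ++ [l[a]] := by
    rw [List.take_add_one, List.getElem?_eq_getElem h, Option.toList_some]
  have h1 : pvShape l (a+1)
      = (0 :: l.take a) ++ (l[a] :: List.replicate (l.length - (a+1)) 0) := by
    simp only [pvShape, ht, List.cons_append, List.append_assoc, List.nil_append]
  rw [h1, List.set_append_right _ _ (by simp; try omega)]
  have h2 : a + 1 - (0 :: l.take a).length = 0 := by simp; try omega
  rw [h2, List.set_cons_zero]
  have h3 : l.length - a = (l.length - (a+1)) + 1 := by omega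
  simp only [pvShape, h3, List.replicate_succ, List.cons_append]

theorem pvTake_zeros (l : List Int) (a b : Nat) (hab : a ≤ b) (hb : b ≤ l.length)
    (h : ∀ k, a ≤ k → k < b → l.getD k 0 = 0) :
    l.take b = l.take a ++ List.replicate (b - a) 0 := by
  apply List.ext_getElem
  · simp; omega
  · intro i h1 h2
    simp only [List.length_take] at h1
    by_cases hia : i < a
    · rw [List.getElem_take, List.getElem_append_left (by simp; omega)]
      rw [List.getElem_take]
    · rw [List.getElem_take, List.getElem_append_right (by simp; omega)]
      rw [List.getElem_replicate]
      have := h i (by omega) (by omega)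
      rwa [List.getD_eq_getElem _ _ (by omega)] at this

theorem pvShape_congr (l : List Int) (a b : Nat) (hab : a ≤ b) (hb : b ≤ l.length)
    (h : ∀ k, a ≤ k → k < b → l.getD k 0 = 0) :
    pvShape l b = pvShape l a := by
  simp only [pvShape, pvTake_zeros l a b hab hb h, List.append_assoc]
  rw [← List.replicate_add]
  have : b - a + (l.length - b) = l.length - a := by omega
  rw [this]

theorem pvHigh_none_getD (u : List Int) (h : pvHigh u = none) :
    ∀ i, i < u.length → u.getD i 0 = 0 := by
  induction u with
  | nil => simp
  | cons t ts ih =>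
    simp only [pvHigh] at h
    rcases hh : pvHigh ts with _ | k
    · rw [hh] at h
      by_cases ht : t = 0
      · intro i hi
        cases i with
        | zero => simpa using ht
        | succ i => simpa using ih hh i (by simp at hi; omega)
      · simp [ht] at h
    · rw [hh] at h; simp at h

theorem pvHigh_none_sum (u : List Int) (h : pvHigh u = none) : u.sum = 0 := by
  induction u with
  | nil => simp
  | cons t ts ih =>
    simp only [pvHigh] at h
    rcases hh : pvHigh ts with _ | k
    · rw [hh] at h
      by_cases ht : t = 0
      · simp [ht, ih hh]
      · simp [ht] at h
    · rw [hh] at h; simp at h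

theorem pvHigh_some (u : List Int) (k : Nat) (h : pvHigh u = some k) :
    k < u.length ∧ u.getD k 0 ≠ 0 ∧ ∀ i, k < i → i < u.length → u.getD i 0 = 0 := by
  induction u generalizing k with
  | nil => simp [pvHigh] at h
  | cons t ts ih =>
    simp only [pvHigh] at h
    rcases hh : pvHigh ts with _ | k'
    · rw [hh] at h
      by_cases ht : t = 0
      · simp [ht] at h
      · simp [ht] at h
        subst h
        refine ⟨by simp, by simpa using ht, ?_⟩
        intro i h1 h2
        cases i with
        | zero => omega
        | succ i =>
          simpa using pvHigh_none_getD ts hh i (by simp at h2; omega)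
    · rw [hh] at h
      simp at h
      subst h
      obtain ⟨h1, h2, h3⟩ := ih k' hh
      refine ⟨by simp; omega, by simpa using h2, ?_⟩
      intro i hi1 hi2
      cases i with
      | zero => omega
      | succ i => simpa using h3 i (by omega) (by simp at hi2; omega)

theorem pvGetD_ne_lt (l : List Int) (k : Nat) (h : l.getD k 0 ≠ 0) : k < l.length := by
  by_contra hk
  exact h (List.getD_eq_default _ _ (by omega))

theorem pvGetD_le_high (l : List Int) (j0 k : Nat) (hh : pvHigh l = some j0)
    (h : l.getD k 0 ≠ 0) : k ≤ j0 := by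
  obtain ⟨_, _, h3⟩ := pvHigh_some l j0 hh
  by_contra hk
  exact h (h3 k (by omega) (pvGetD_ne_lt l k h))

theorem pvScan_eq (fuel : Nat) : ∀ (d : Nat), d < fuel → ∀ (terms : List Int) (idx left : Int),
    (∀ c : Nat, c < d → PySem.List.pyGet? terms (idx - (left + c)) = some 0) →
    (∃ v, PySem.List.pyGet? terms (idx - (left + d)) = some v ∧ v ≠ 0) →
    pvScan terms idx left fuel = left + d := by
  induction fuel with
  | zero => intro d hd; omega
  | succ f ih =>
    intro d hd terms idx left hz hnz
    cases d with
    | zero =>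
      obtain ⟨v, hv, hvnz⟩ := hnz
      simp only [Nat.cast_zero, add_zero] at hv
      simp only [pvScan, hv, if_neg hvnz]
      simp
    | succ d =>
      have h0 := hz 0 (by omega)
      simp only [Nat.cast_zero, add_zero] at h0
      simp only [pvScan, h0]
      have := ih d (by omega) terms idx (left + 1)
        (fun c hc => by
          have := hz (c+1) (by omega)
          rwa [show idx - (left + 1 + (c:Int)) = idx - (left + ((c:Nat)+1:Nat)) by push_cast; ring])
        (by
          obtain ⟨v, hv, hvnz⟩ := hnz
          exact ⟨v, by rwa [show idx - (left + 1 + (d:Int)) = idx - (left + ((d:Nat)+1:Nat)) by push_cast; ring], hvnz⟩)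
      rw [this]
      push_cast
      ring

theorem pvGetD_take (l : List Int) (j i : Nat) (hi : i < j) :
    (l.take j).getD i 0 = l.getD i 0 := by
  rw [List.getD_eq_getElem?_getD, List.getElem?_take_of_lt hi, ← List.getD_eq_getElem?_getD]

theorem pvLoop_inv (l : List Int) :
    ∀ (fuel j q : Nat), j < l.length → l.getD j 0 ≠ 0 → pvGC l j q → ∀ ans : Int, j + 1 ≤ fuel →
    pvLoopA fuel (pvShape l (j+1)) (((j:Int)+1) - ((l.length:Int)+1)) ans
      = ans + (l.take (j+1)).sum + ((j:Int) - (q:Int)) := by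
  intro fuel
  induction fuel with
  | zero => intro j q hj hnz hq ans hf; omega
  | succ f ih =>
    intro j q hj hnz hq ans hf
    obtain ⟨hq1, hq2, hq3, hq4⟩ := hq
    have hjm : j + 1 ≤ l.length := hj
    have hidx : ((j:Int)+1) - ((l.length:Int)+1) = -(((l.length - j : Nat)):Int) := by omega
    have hlen : (pvShape l (j+1)).length = l.length + 1 := length_pvShape l (j+1) hjm
    have hget : PySem.List.pyGet? (pvShape l (j+1)) (((j:Int)+1) - ((l.length:Int)+1))
        = some (l.getD j 0) := by
      rw [hidx, PySem.List.pyGet?_neg_natCast _ _ (by omega) (by omega)]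
      rw [show (pvShape l (j+1)).length - (l.length - j) = j + 1 by omega]
      rw [pvShape_get? l (j+1) (j+1) (by omega) (by omega) (by omega)]
      simp
    have hset : PySem.List.pySetD (pvShape l (j+1)) (((j:Int)+1) - ((l.length:Int)+1)) 0
        = pvShape l j := by
      rw [hidx, pvSetD_neg _ _ _ (by omega) (by omega)]
      rw [show (pvShape l (j+1)).length - (l.length - j) = j + 1 by omega]
      exact set_pvShape l j hj
    simp only [pvLoopA, hget, hset, sum_pvShape]
    by_cases hs : (l.take j).sum = 0
    · rw [if_pos hs]
      have hqj : q = j := by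
        have := hq4 j le_rfl hs hnz
        omega
      rw [List.sum_take_succ _ _ hj, hqj]
      rw [List.getD_eq_getElem _ _ hj]
      omega
    · rw [if_neg hs]
      rcases hh : pvHigh (l.take j) with _ | jp
      · exact absurd (pvHigh_none_sum _ hh) hs
      obtain ⟨hjp1, hjp2, hjp3⟩ := pvHigh_some _ _ hh
      rw [List.length_take] at hjp1
      have hjpj : jp < j := by omega
      have hjpnz : l.getD jp 0 ≠ 0 := by rwa [pvGetD_take l j jp hjpj] at hjp2
      have hbet : ∀ i, jp < i → i < j → l.getD i 0 = 0 := by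
        intro i h1 h2
        have := hjp3 i h1 (by rw [List.length_take]; omega)
        rwa [pvGetD_take l j i h2] at this
      -- the greatest checkpoint stays the same below jp
      have hqjp : q ≤ jp := by
        by_contra hgt
        rcases Nat.lt_or_ge q j with hlt | hge
        · exact hq3 (hbet q (by omega) hlt)
        · have : q = j := by omega
          rw [this] at hq2
          exact hs hq2
      have hgc' : pvGC l jp q :=
        ⟨hqjp, hq2, hq3, fun k hk h1 h2 => hq4 k (by omega) h1 h2⟩
      -- the scan
      have hscan : pvScan (pvShape l j) (((j:Int)+1) - ((l.length:Int)+1)) 1 (pvShape l j).length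
          = 1 + ((j - jp - 1 : Nat) : Int) := by
        apply pvScan_eq _ _ (by rw [length_pvShape l j (by omega)]; omega)
        · intro c hc
          have hci : ((j:Int)+1) - ((l.length:Int)+1) - (1 + (c:Int))
              = -(((l.length - j + 1 + c : Nat)):Int) := by omega
          rw [hci, PySem.List.pyGet?_neg_natCast _ _ (by omega) (by rw [length_pvShape l j (by omega)]; omega)]
          rw [show (pvShape l j).length - (l.length - j + 1 + c) = j - c - 1 + 1 by
            rw [length_pvShape l j (by omega)]; omega]
          rw [pvShape_get? l j (j - c - 1 + 1) (by omega) (by omega) (by omega)]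
          rw [show j - c - 1 + 1 - 1 = j - c - 1 by omega]
          rw [hbet (j - c - 1) (by omega) (by omega)]
        · refine ⟨l.getD jp 0, ?_, hjpnz⟩
          have hci : ((j:Int)+1) - ((l.length:Int)+1) - (1 + ((j - jp - 1 : Nat):Int))
              = -(((l.length - jp : Nat)):Int) := by omega
          rw [hci, PySem.List.pyGet?_neg_natCast _ _ (by omega) (by rw [length_pvShape l j (by omega)]; omega)]
          rw [show (pvShape l j).length - (l.length - jp) = jp + 1 by
            rw [length_pvShape l j (by omega)]; omega]
          rw [pvShape_get? l j (jp + 1) (by omega) (by omega) (by omega)]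
          simp
      rw [hscan, if_neg (lt_irrefl _)]
      have hcongr : pvShape l j = pvShape l (jp + 1) :=
        pvShape_congr l (jp+1) j (by omega) (by omega) (fun k h1 h2 => hbet k (by omega) h2)
      have hidx2 : ((j:Int)+1) - ((l.length:Int)+1) - (1 + ((j - jp - 1 : Nat):Int))
          = ((jp:Int)+1) - ((l.length:Int)+1) := by omega
      rw [hcongr, hidx2, ih jp q (by omega) hjpnz hgc' _ (by omega)]
      -- arithmetic
      have hsum1 : (l.take (j+1)).sum = (l.take j).sum + l.getD j 0 := by
        rw [List.sum_take_succ _ _ hj, List.getD_eq_getElem _ _ hj]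
      have hsum2 : (l.take j).sum = (l.take (jp+1)).sum := by
        rw [pvTake_zeros l (jp+1) j (by omega) (by omega) (fun k h1 h2 => hbet k (by omega) h2)]
        simp
      rw [hsum1, hsum2]
      omega

theorem pvLoopA_step (f : Nat) (terms : List Int) (idx ans : Int) :
    pvLoopA (f+1) terms idx ans = match PySem.List.pyGet? terms idx with
      | none => ans
      | some t =>
        let answer := ans + t
        let terms := PySem.List.pySetD terms idx 0
        if terms.sum = 0 then answer
        else
          let left := pvScan terms idx 1 terms.length
          let right := pvScan terms idx 1 terms.length
          let step := if left < right then left else right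
          pvLoopA f terms (idx - step) (answer + step) := rfl

theorem pvSet0_cons (t0 : Int) (l : List Int) :
    PySem.List.pySetD (t0 :: l) 0 0 = 0 :: l := by
  simp [PySem.List.pySetD, PySem.List.pySet?, PySem.List.pyIdx?]

theorem pvMain_zero (t0 : Int) (l : List Int) (hs : l.sum = 0) :
    pvLoopA (l.length + 2) (t0 :: l) 0 0 = t0 := by
  rw [show l.length + 2 = (l.length + 1) + 1 from rfl, pvLoopA_step, PySem.List.pyGet?_zero_cons]
  simp only [pvSet0_cons, List.sum_cons, zero_add, hs]
  simp

theorem pvMain_pos (t0 : Int) (l : List Int) (j0 q : Nat)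
    (hh : pvHigh l = some j0) (hgc : pvGC l j0 q) (hs : l.sum ≠ 0) :
    pvLoopA (l.length + 2) (t0 :: l) 0 0 = t0 + l.sum + ((l.length : Int) - (q : Int)) := by
  obtain ⟨hj1, hj2, hj3⟩ := pvHigh_some _ _ hh
  have hsh : (0:Int) :: l = pvShape l l.length := by simp [pvShape]
  rw [show l.length + 2 = (l.length + 1) + 1 from rfl, pvLoopA_step, PySem.List.pyGet?_zero_cons]
  simp only [pvSet0_cons, hsh, sum_pvShape, List.take_length]
  rw [if_neg hs]
  have hm : 0 < l.length := by omega
  have hscan : pvScan (pvShape l l.length) 0 1 (pvShape l l.length).length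
      = 1 + ((l.length - j0 - 1 : Nat) : Int) := by
    apply pvScan_eq _ _ (by rw [length_pvShape l l.length le_rfl]; omega)
    · intro c hc
      have hci : (0:Int) - (1 + (c:Int)) = -(((1 + c : Nat)):Int) := by omega
      rw [hci, PySem.List.pyGet?_neg_natCast _ _ (by omega)
        (by rw [length_pvShape l l.length le_rfl]; omega)]
      rw [show (pvShape l l.length).length - (1 + c) = l.length - c - 1 + 1 by
        rw [length_pvShape l l.length le_rfl]; omega]
      rw [pvShape_get? l l.length (l.length - c - 1 + 1) (by omega) (by omega) le_rfl]
      rw [show l.length - c - 1 + 1 - 1 = l.length - c - 1 by omega]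
      rw [hj3 (l.length - c - 1) (by omega) (by omega)]
    · refine ⟨l.getD j0 0, ?_, hj2⟩
      have hci : (0:Int) - (1 + ((l.length - j0 - 1 : Nat):Int))
          = -(((l.length - j0 : Nat)):Int) := by omega
      rw [hci, PySem.List.pyGet?_neg_natCast _ _ (by omega)
        (by rw [length_pvShape l l.length le_rfl]; omega)]
      rw [show (pvShape l l.length).length - (l.length - j0) = j0 + 1 by
        rw [length_pvShape l l.length le_rfl]; omega]
      rw [pvShape_get? l l.length (j0 + 1) (by omega) (by omega) le_rfl]
      simp
  rw [hscan, if_neg (lt_irrefl _)]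
  have hcongr : pvShape l l.length = pvShape l (j0 + 1) :=
    pvShape_congr l (j0+1) l.length (by omega) le_rfl (fun k h1 h2 => hj3 k (by omega) h2)
  have hidx2 : (0:Int) - (1 + ((l.length - j0 - 1 : Nat):Int))
      = ((j0:Int)+1) - ((l.length:Int)+1) := by omega
  rw [hcongr, hidx2, pvLoop_inv l (l.length + 1) j0 q hj1 hj2 hgc _ (by omega)]
  have hsum : (l.take (j0+1)).sum = l.sum := by
    conv_rhs => rw [← List.take_length (l := l),
      pvTake_zeros l (j0+1) l.length (by omega) le_rfl (fun k h1 h2 => hj3 k (by omega) h2)]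
    simp
  rw [hsum]
  have hq1 := hgc.1
  omega

-- B-side characterisation of pvFold
theorem pvFold_fst (l : List Int) : ∀ (i s p : Int), (pvFold l i s p).1 = s + l.sum := by
  induction l with
  | nil => intro i s p; simp [pvFold]
  | cons t ts ih =>
    intro i s p
    simp only [pvFold, ih, List.sum_cons]
    ring

theorem pvFold_none (l : List Int) : ∀ (i s p : Int),
    (∀ k : Nat, s + (l.take k).sum = 0 → l.getD k 0 = 0) → (pvFold l i s p).2 = p := by
  induction l with
  | nil => intro i s p _; simp [pvFold]
  | cons t ts ih =>
    intro i s p h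
    have hp : ¬ (s = 0 ∧ t ≠ 0) := by
      rintro ⟨hs, ht⟩
      exact ht (by simpa using h 0 (by simpa using hs))
    simp only [pvFold, if_neg hp]
    apply ih
    intro k hk
    have := h (k+1) (by simpa [add_assoc] using hk)
    simpa using this

theorem pvFold_greatest (l : List Int) : ∀ (i s p : Int) (q : Nat),
    s + (l.take q).sum = 0 → l.getD q 0 ≠ 0 →
    (∀ k : Nat, s + (l.take k).sum = 0 → l.getD k 0 ≠ 0 → k ≤ q) →
    (pvFold l i s p).2 = i + (q : Int) := by
  induction l with
  | nil => intro i s p q _ hq _; simp at hq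
  | cons t ts ih =>
    intro i s p q hq1 hq2 hmax
    cases q with
    | zero =>
      have hs : s = 0 := by simpa using hq1
      have ht : t ≠ 0 := by simpa using hq2
      simp only [pvFold, if_pos (And.intro hs ht)]
      rw [pvFold_none ts (i+1) (s+t) i]
      · simp
      · intro k hk
        by_contra hnz
        have : k + 1 ≤ 0 := hmax (k+1) (by simpa [add_assoc] using hk) (by simpa using hnz)
        omega
    | succ q' =>
      simp only [pvFold]
      rw [ih (i+1) (s+t) _ q'
        (by simpa [add_assoc] using hq1)
        (by simpa using hq2)
        (fun k hk hnz => by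
          have : k + 1 ≤ q' + 1 := hmax (k+1) (by simpa [add_assoc] using hk) (by simpa using hnz)
          omega)]
      push_cast
      ring

-- existence of a checkpoint when the tail sum is nonzero
theorem pvExists_cand (l : List Int) (hs : l.sum ≠ 0) :
    ∃ k : Nat, (l.take k).sum = 0 ∧ l.getD k 0 ≠ 0 := by
  induction l with
  | nil => simp at hs
  | cons t ts ih =>
    by_cases ht : t = 0
    · subst ht
      obtain ⟨k, h1, h2⟩ := ih (by simpa using hs)
      exact ⟨k+1, by simpa using h1, by simpa using h2⟩
    · exact ⟨0, by simp, by simpa using ht⟩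

theorem pvGC_exists (l : List Int) (j0 : Nat) (hh : pvHigh l = some j0) (hs : l.sum ≠ 0) :
    ∃ q, pvGC l j0 q ∧ ∀ k : Nat, (l.take k).sum = 0 → l.getD k 0 ≠ 0 → k ≤ q := by
  obtain ⟨k0, hk1, hk2⟩ := pvExists_cand l hs
  have hk0 : k0 ≤ j0 := pvGetD_le_high l j0 k0 hh hk2
  have hPk0 : (fun k => (l.take k).sum = 0 ∧ l.getD k 0 ≠ 0) k0 := ⟨hk1, hk2⟩
  have hspec := Nat.findGreatest_spec (P := fun k => (l.take k).sum = 0 ∧ l.getD k 0 ≠ 0) (m := k0) (n := j0) hk0 hPk0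
  exact ⟨Nat.findGreatest (fun k => (l.take k).sum = 0 ∧ l.getD k 0 ≠ 0) j0,
    ⟨Nat.findGreatest_le j0, hspec.1, hspec.2,
      fun k hk h1 h2 => Nat.le_findGreatest hk ⟨h1, h2⟩⟩,
    fun k h1 h2 => Nat.le_findGreatest (pvGetD_le_high l j0 k hh h2) ⟨h1, h2⟩⟩

theorem pvEquiv : ∀ (name : String), Pre_solution name →
    solution name = solution_alt name := by
  intro name hpre
  rcases hcs : name.toList with _ | ⟨c0, cs⟩
  · exact absurd hcs hpre
  have hA : solution name = pvLoopA ((cs.map pvCost).length + 2) (pvCost c0 :: cs.map pvCost) 0 0 := by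
    unfold solution
    rw [hcs]
    simp only [List.map_cons, List.length_cons]
  set l := cs.map pvCost with hl
  set t0 := pvCost c0 with ht0
  have hfold1 : (pvFold l 1 0 ((l.length : Int) + 1)).1 = l.sum := by
    rw [pvFold_fst]; ring
  have hB : solution_alt name
      = t0 + l.sum + (((l.length : Int) + 1)
          - (if l.sum = 0 then (l.length : Int) + 1 else (pvFold l 1 0 ((l.length : Int) + 1)).2)) := by
    unfold solution_alt
    rw [hcs]
    simp only [List.map_cons, List.length_cons, List.drop_succ_cons, List.drop_zero, List.sum_cons]
    rw [show (((l.length + 1 : Nat)) : Int) = (l.length : Int) + 1 by push_cast; ring]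
    rw [hfold1]
  by_cases hz : l.sum = 0
  · rw [hA, hB, pvMain_zero t0 l hz, if_pos hz, hz]
    ring
  · rcases hh : pvHigh l with _ | j0
    · exact absurd (pvHigh_none_sum _ hh) hz
    obtain ⟨q, hgc, hglobal⟩ := pvGC_exists l j0 hh hz
    have hfold2 : (pvFold l 1 0 ((l.length : Int) + 1)).2 = 1 + (q : Int) :=
      pvFold_greatest l 1 0 _ q (by simpa using hgc.2.1) hgc.2.2.1
        (fun k h1 h2 => hglobal k (by simpa using h1) h2)
    rw [hA, hB, pvMain_pos t0 l j0 q hh hgc hz, if_neg hz, hfold2]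
    ring

-- ===== VERDICT (by name: the statement is the Claim_ definition above) =====
theorem solution_spec : Claim_equal_solution := by
  unfold Claim_equal_solution
  intro name _ hpre
  exact pvEquiv name hpre
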